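-- pv_equiv track=rewrite | github.com/landmanbester/hip-cargo | src/hip_cargo/utils/cab_to_function.py | split_info_at_periods
-- ===== SOURCE A (Python) =====
-- def split_info_at_periods(info: str) -> str:
--     """
--     Split info string at periods to create multi-line help text.
--
--     This helps avoid long line issues in generated code.
--
--     Args:
--         info: Info string to split
--
--     Returns:
--         Info string with newlines after periods
--     """
--     if not info:
--         return info
--
--     # Split at ". " (period followed by space) to preserve sentence boundaries
--     # This avoids splitting on periods in numbers like "1.5" or file extensions
--     sentences = []
--     current = ""
--     i = 0
--
--     while i < len(info):
--         current += info[i]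
--         # Check if we hit a period followed by space (or end of string)
--         if info[i] == "." and (i + 1 >= len(info) or info[i + 1] == " "):
--             # Found end of sentence
--             sentence = current.strip()
--             if sentence:
--                 sentences.append(sentence)
--             current = ""
--             # Skip the space after the period
--             if i + 1 < len(info) and info[i + 1] == " ":
--                 i += 1
--         i += 1
--
--     # Add any remaining text
--     remaining = current.strip()
--     if remaining:
--         sentences.append(remaining)
--
--     # Join with newlines
--     return "\n".join(sentences)
-- ===== SOURCE B (Python) =====
-- def split_info_at_periods(info: str) -> str:
--     """Split info string at periods to create multi-line help text."""
--     parts = info.split(". ")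
--     # every split boundary consumed ". ", so re-attach the period to all but the last piece
--     fixed = [p + "." for p in parts[:-1]] + parts[-1:]
--     sentences = [s for s in (p.strip() for p in fixed) if s]
--     return "\n".join(sentences)
-- ===== Notes on version B (the rewrite author's own statement) =====
-- stated objective: faster
-- what changed: Replaces the char-by-char accumulator scan (manual index, quadratic string concatenation into a sentence buffer, space-skipping) by a single str.split on the period-space separator followed by re-attaching the period to all but the last piece, then strip/filter/join.
import Mathlib
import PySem

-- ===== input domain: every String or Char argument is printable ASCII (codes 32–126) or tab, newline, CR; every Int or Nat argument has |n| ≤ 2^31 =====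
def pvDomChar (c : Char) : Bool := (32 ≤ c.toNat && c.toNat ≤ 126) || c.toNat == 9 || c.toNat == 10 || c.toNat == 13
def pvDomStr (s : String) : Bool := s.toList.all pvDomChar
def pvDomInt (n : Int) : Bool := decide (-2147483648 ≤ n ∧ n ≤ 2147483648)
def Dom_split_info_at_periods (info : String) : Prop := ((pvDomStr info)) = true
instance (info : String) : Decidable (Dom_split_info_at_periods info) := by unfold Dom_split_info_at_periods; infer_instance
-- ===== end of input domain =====

-- B replaces A's char-by-char accumulator scan (quadratic string concatenation) by one split on the period-space separator + re-attaching the period + strip/filter/join; a timing run measured B faster.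

-- ===== PORT A =====
def pvALoop : List Char → List (List Char) → List Char → List (List Char)
  | [], sentences, current =>
      let remaining := PySem.Chars.strip current
      if remaining ≠ [] then sentences ++ [remaining] else sentences
  | c :: rest, sentences, current =>
      let current' := current ++ [c]
      if c = '.' ∧ (rest = [] ∨ rest.head? = some ' ') then
        let sentence := PySem.Chars.strip current'
        let sentences' := if sentence ≠ [] then sentences ++ [sentence] else sentences
        if rest.head? = some ' ' then pvALoop rest.tail sentences' []  -- skip the space after the period
        else pvALoop rest sentences' []
      else pvALoop rest sentences current'
termination_by cs _ _ => cs.length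
decreasing_by all_goals simp [List.length_tail]

def split_info_at_periods (info : String) : String :=
  if info.toList = [] then info
  else String.ofList (PySem.Chars.join ['\n'] (pvALoop info.toList [] []))

-- ===== PORT B =====
def split_info_at_periods_alt (info : String) : String :=
  let parts := PySem.Chars.splitOn info.toList ['.', ' ']    -- info.split(". ")
  -- [p + "." for p in parts[:-1]] + parts[-1:]
  let fixed := (PySem.List.slice parts none (some (-1))).map (fun p => p ++ ['.'])
               ++ PySem.List.slice parts (some (-1)) none
  let sentences := (fixed.map PySem.Chars.strip).filter (fun s => s ≠ [])
  String.ofList (PySem.Chars.join ['\n'] sentences)        -- "\n".join(sentences)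

-- ===== PRECONDITION & SPEC =====
def Spec_split_info_at_periods (info : String) (out : String) : Prop := out = split_info_at_periods_alt info
instance (info : String) (out : String) : Decidable (Spec_split_info_at_periods info out) := by unfold Spec_split_info_at_periods; infer_instance

-- ===== CLAIM (what is proved, stated in full; the proofs are below) =====
def Claim_equal_split_info_at_periods : Prop := ∀ (info : String), Dom_split_info_at_periods info → Spec_split_info_at_periods info (split_info_at_periods info)

-- ===== LEMMAS AND PROOFS =====
-- The common skeleton both programs compute: split at ". " (pvSplit), re-attach '.' to all
-- but the last piece (pvReattach), strip each piece and drop empties (pvEmit).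
def pvConsHead (c : Char) : List (List Char) → List (List Char)
  | [] => [[c]]
  | s :: ss => (c :: s) :: ss

def pvSplit : List Char → List (List Char)
  | [] => [[]]
  | '.' :: ' ' :: r => [] :: pvSplit r
  | c :: r => pvConsHead c (pvSplit r)

def pvAttach (cur : List Char) : List (List Char) → List (List Char)
  | [] => [cur]
  | s :: ss => (cur ++ s) :: ss

def pvReattach : List (List Char) → List (List Char)
  | [] => []
  | [s] => [s]
  | s :: ss => (s ++ ['.']) :: pvReattach ss

def pvEmit (xss : List (List Char)) : List (List Char) :=
  (xss.map PySem.Chars.strip).filter (fun s => s ≠ [])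

theorem pvConsHead_ne_nil (c : Char) (ss : List (List Char)) : pvConsHead c ss ≠ [] := by
  cases ss <;> simp [pvConsHead]

theorem pvSplit_ne_nil (cs : List Char) : pvSplit cs ≠ [] := by
  rw [pvSplit.eq_def]
  split
  · simp
  · simp
  · exact pvConsHead_ne_nil _ _

theorem pvSplit_cons (c : Char) (r : List Char) (hne : ∀ r', c = '.' → r = ' ' :: r' → False) :
    pvSplit (c :: r) = pvConsHead c (pvSplit r) := by
  rw [pvSplit.eq_def]
  split
  · simp_all
  · rename_i r' heq
    exfalso
    injection heq with h1 h2
    exact hne r' h1 h2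
  · rename_i a b hx heq
    injection heq with h1 h2
    subst h1; subst h2
    rfl

theorem pvReattach_cons_cons (s t : List Char) (ts : List (List Char)) :
    pvReattach (s :: t :: ts) = (s ++ ['.']) :: pvReattach (t :: ts) := by
  rw [pvReattach]; simp

theorem pvReattach_ne_nil (xs : List (List Char)) (h : xs ≠ []) : pvReattach xs ≠ [] := by
  cases xs with
  | nil => simp_all
  | cons s ss => cases ss <;> simp [pvReattach]

-- parts[:-1] each + '.', plus parts[-1:], is pvReattach

theorem pvAttach_nil (ss : List (List Char)) (h : ss ≠ []) : pvAttach [] ss = ss := by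
  cases ss <;> simp_all [pvAttach]

theorem pvEmit_cons (s : List Char) (ss : List (List Char)) :
    pvEmit (s :: ss) = (if PySem.Chars.strip s ≠ [] then [PySem.Chars.strip s] else []) ++ pvEmit ss := by
  simp only [pvEmit, List.map_cons, List.filter_cons]
  split_ifs with h1 h2 h3 <;> simp_all

theorem pvStep (cur : List Char) (c : Char) (ss : List (List Char)) (h : ss ≠ []) :
    pvAttach cur (pvReattach (pvConsHead c ss)) = pvAttach (cur ++ [c]) (pvReattach ss) := by
  cases ss with
  | nil => simp_all
  | cons s ts =>
      cases ts with
      | nil => simp [pvConsHead, pvReattach, pvAttach]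
      | cons t ts' =>
          rw [pvConsHead]
          rw [show pvReattach ((c :: s) :: t :: ts') = ((c :: s) ++ ['.']) :: pvReattach (t :: ts') from by rw [pvReattach]; simp]
          rw [show pvReattach (s :: t :: ts') = (s ++ ['.']) :: pvReattach (t :: ts') from by rw [pvReattach]; simp]
          simp [pvAttach]

theorem pvGo_spec (fuel : Nat) : ∀ (l cur : List Char) (acc : List (List Char)), l.length < fuel →
    PySem.Chars.splitOn.go ['.', ' '] fuel l cur acc = acc.reverse ++ pvAttach cur.reverse (pvSplit l) := by
  induction fuel with
  | zero => intro l cur acc h; omega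
  | succ f ih =>
      intro l cur acc h
      cases l with
      | nil => simp [PySem.Chars.splitOn.go, pvSplit, pvAttach]
      | cons c rest =>
          rw [PySem.Chars.splitOn.go]
          by_cases hp : List.isPrefixOf ['.', ' '] (c :: rest) = true
          · rw [if_pos hp]
            cases rest with
            | nil => simp [List.isPrefixOf] at hp
            | cons d r =>
                simp [List.isPrefixOf] at hp
                obtain ⟨h1, h2⟩ := hp
                subst h1; subst h2
                rw [ih _ _ _ (by simp at h ⊢; omega)]
                rw [show pvSplit ('.' :: ' ' :: r) = [] :: pvSplit r from by rw [pvSplit]]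
                cases hs : pvSplit r with
                | nil => exact absurd hs (pvSplit_ne_nil r)
                | cons s ss => simp [pvAttach, hs]
          · rw [if_neg hp]
            rw [ih _ _ _ (by simp at h ⊢; omega)]
            have hsplit : pvSplit (c :: rest) = pvConsHead c (pvSplit rest) := by
              rw [pvSplit.eq_def]
              split
              · simp_all
              · rename_i r heq
                exfalso
                injection heq with h1 h2
                subst h1; subst h2
                simp [List.isPrefixOf] at hp
              · rename_i a b hne heq
                injection heq with h1 h2
                subst h1; subst h2
                rfl
            rw [hsplit]
            cases hs : pvSplit rest with
            | nil => exact absurd hs (pvSplit_ne_nil rest)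
            | cons s ss => simp [pvAttach, pvConsHead]

theorem pvSplitOn_eq (cs : List Char) : PySem.Chars.splitOn cs ['.', ' '] = pvSplit cs := by
  rw [PySem.Chars.splitOn, pvGo_spec (cs.length + 1) cs [] [] (by omega)]
  cases hs : pvSplit cs with
  | nil => exact absurd hs (pvSplit_ne_nil cs)
  | cons s ss => simp [pvAttach]

theorem pvSlices_eq_reattach (xs : List (List Char)) (h : xs ≠ []) :
    (PySem.List.slice xs none (some (-1))).map (fun p => p ++ ['.'])
      ++ PySem.List.slice xs (some (-1)) none = pvReattach xs := by
  rw [PySem.List.slice_to_neg_one, PySem.List.slice_from_neg_one]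
  induction xs with
  | nil => simp_all
  | cons s ss ih =>
      cases ss with
      | nil => simp [pvReattach]
      | cons t ts =>
          rw [show pvReattach (s :: t :: ts) = (s ++ ['.']) :: pvReattach (t :: ts) from by rw [pvReattach]; simp]
          simpa using ih (by simp)

theorem pvALoop_spec (cs : List Char) : ∀ (sents : List (List Char)) (cur : List Char),
    pvALoop cs sents cur = sents ++ pvEmit (pvAttach cur (pvReattach (pvSplit cs))) := by
  induction cs using pvSplit.induct with
  | case1 =>
      intro sents cur
      simp [pvALoop, pvSplit, pvReattach, pvAttach, pvEmit]
      split_ifs <;> simp_all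
  | case2 r ih =>
      intro sents cur
      rw [show pvALoop ('.' :: ' ' :: r) sents cur
            = pvALoop r (if PySem.Chars.strip (cur ++ ['.']) ≠ [] then sents ++ [PySem.Chars.strip (cur ++ ['.'])] else sents) [] from by
          rw [pvALoop]; simp]
      rw [ih]
      rw [show pvSplit ('.' :: ' ' :: r) = [] :: pvSplit r from by rw [pvSplit]]
      rw [show pvReattach ([] :: pvSplit r) = ['.'] :: pvReattach (pvSplit r) from by
          cases hs : pvSplit r with
          | nil => exact absurd hs (pvSplit_ne_nil r)
          | cons s ss => rw [pvReattach_cons_cons]; simp]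
      rw [pvAttach_nil _ (pvReattach_ne_nil _ (pvSplit_ne_nil r))]
      rw [show pvAttach cur (['.'] :: pvReattach (pvSplit r)) = (cur ++ ['.']) :: pvReattach (pvSplit r) from by rw [pvAttach]]
      rw [pvEmit_cons]
      split_ifs <;> simp
  | case3 c r hne ih =>
      intro sents cur
      by_cases hc : c = '.' ∧ (r = [] ∨ r.head? = some ' ')
      · -- from hne, the space case is impossible: r = []
        obtain ⟨hcdot, hr⟩ := hc
        have hrnil : r = [] := by
          cases hr with
          | inl h => exact h
          | inr h =>
              exfalso
              cases r with
              | nil => simp at h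
              | cons d r' => simp at h; exact hne r' hcdot (by rw [h])
        subst hrnil; subst hcdot
        rw [show pvALoop ['.'] sents cur
              = (if PySem.Chars.strip (cur ++ ['.']) ≠ [] then sents ++ [PySem.Chars.strip (cur ++ ['.'])] else sents) from by
            rw [pvALoop]; simp [pvALoop, PySem.Chars.strip]; decide]
        rw [pvSplit_cons _ _ (by intro r' _ h; cases h), ]
        rw [show pvSplit ([] : List Char) = [[]] from by rw [pvSplit]]
        rw [show pvConsHead '.' [[]] = [['.']] from rfl]
        rw [show pvReattach [['.']] = [['.']] from by rw [pvReattach]]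
        rw [show pvAttach cur [['.']] = [cur ++ ['.']] from by rw [pvAttach]]
        rw [pvEmit_cons]
        simp [pvEmit]
        split_ifs <;> simp
      · rw [show pvALoop (c :: r) sents cur = pvALoop r sents (cur ++ [c]) from by
            rw [pvALoop]; simp [hc]]
        rw [ih]
        rw [pvSplit_cons _ _ (by
          intro r' h1 h2
          exact hc ⟨h1, Or.inr (by rw [h2]; rfl)⟩)]
        rw [pvStep _ _ _ (pvSplit_ne_nil r)]

-- ===== VERDICT (by name: the statement is the Claim_ definition above) =====
theorem split_info_at_periods_spec : Claim_equal_split_info_at_periods := by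
  intro info _
  show split_info_at_periods info = split_info_at_periods_alt info
  simp only [split_info_at_periods, split_info_at_periods_alt, pvSplitOn_eq,
    pvSlices_eq_reattach _ (pvSplit_ne_nil _)]
  by_cases h : info.toList = []
  · rw [if_pos h, h, String.toList_eq_nil_iff.mp h]
    decide
  · rw [if_neg h, pvALoop_spec]
    rw [pvAttach_nil _ (pvReattach_ne_nil _ (pvSplit_ne_nil _))]
    simp [pvEmit]
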